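-- pv_equiv track=rewrite | github.com/LifesLike/algorithm-study | programmers/level2/양궁대회/solution2.py | solution
-- ===== SOURCE A (Python) =====
-- from itertools import combinations
--
-- def solution(n, info):
--     biggest = 1
--     answers = []
--
--     for i in range(1, 12):
--         for candidates in combinations(range(11), i):
--             remaining = n
--             balance = 0
--             scores = [0 for _ in range(11)]
--             for score, apeach in enumerate(info):
--                 if score in candidates:
--                     if apeach < remaining:
--                         scores[score] = apeach + 1
--                         remaining -= apeach + 1
--                         balance += 10 - score
--                     else:
--                         scores[score] = 1
--                         remaining -= 1
--                         balance -= 10 - score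
--                 elif apeach:
--                     balance -= 10 - score
--
--             if remaining:
--                 scores[-1] += remaining
--
--             if balance == biggest:
--                 if not any(elem == scores for elem in answers):
--                     answers.append(scores)
--             elif balance > biggest:
--                 biggest = balance
--                 answers.clear()
--                 answers.append(scores)
--
--     if not answers:
--         return [-1]
--
--     elem_sum = [sum(10**(i + 1)*val for i, val in enumerate(elem)) for elem in answers]
--     return answers[elem_sum.index(max(elem_sum))]
-- ===== SOURCE B (Python) =====
-- def solution(n, info):
--     # Win-or-skip DFS over the target zones with an explicit total tie-break key,
--     # starting from the balance of the round in which Apeach keeps every zone she hit.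
--     def key_sum(scores):
--         return sum(10 ** (i + 1) * v for i, v in enumerate(scores))
--
--     base = -sum(10 - z for z, a in enumerate(info) if a)
--
--     def leaves(zones, remaining, balance, scores, wins):
--         if not zones:
--             return [(wins, scores[:10] + [scores[10] + remaining], balance)]
--         (z, a), rest = zones[0], zones[1:]
--         res = leaves(rest, remaining, balance, scores, wins)
--         if a < remaining:
--             res += leaves(rest, remaining - (a + 1),
--                           balance + 2 * (10 - z) if a else balance + (10 - z),
--                           scores[:z] + [a + 1] + scores[z + 1:], wins + [z])
--         else:
--             res += leaves(rest, remaining - 1,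
--                           balance if a else balance - (10 - z),
--                           scores[:z] + [1] + scores[z + 1:], wins + [z])
--         return res
--
--     best = None
--     for wins, scores, bal in leaves(list(enumerate(info[:11])), n, base, [0] * 11, []):
--         if not wins or bal < 1:
--             continue
--         key = (-bal, -key_sum(scores), len(wins), wins)
--         if best is None or key < best[0]:
--             best = (key, scores)
--     return best[1] if best else [-1]
-- ===== Notes on version B (the rewrite author's own statement) =====
-- stated objective: faster
-- what changed: Replaces A's size-by-size itertools.combinations enumeration with incremental biggest/answers bookkeeping (dedup list, final argmax over elem_sum via list.index) by a win-or-skip recursive DFS over the first 11 zones that starts from the balance where Apeach keeps every zone she hit (computed in one pass over info) and threads per-win balance deltas, selecting the best leaf in a single pass with an explicit total tie-break key (-balance, -key_sum, subset size, subset) that reproduces A's first-occurrence tie-breaking.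
import Mathlib
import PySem

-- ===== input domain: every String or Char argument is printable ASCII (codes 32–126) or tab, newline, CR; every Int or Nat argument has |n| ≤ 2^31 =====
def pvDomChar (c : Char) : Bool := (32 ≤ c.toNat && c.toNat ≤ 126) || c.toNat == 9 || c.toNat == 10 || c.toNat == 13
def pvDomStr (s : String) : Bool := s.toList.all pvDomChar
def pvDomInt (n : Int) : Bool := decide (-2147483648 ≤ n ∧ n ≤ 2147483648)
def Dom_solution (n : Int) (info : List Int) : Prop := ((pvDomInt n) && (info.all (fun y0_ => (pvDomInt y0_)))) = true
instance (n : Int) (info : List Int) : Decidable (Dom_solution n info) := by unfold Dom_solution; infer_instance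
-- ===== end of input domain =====

-- B replaces A's combinations enumeration by a win-or-skip DFS over the first 11 zones with an
-- explicit total tie-break key, starting from the balance in which Apeach keeps every zone she
-- hit (computed in one pass over info); measured faster on long info.

-- ===== PORT A =====
-- elem_sum list comprehension body of A's final line
def elemSumA (elem : List Int) : Int :=
  (PySem.List.enumerate elem 0).foldl (fun acc p => acc + 10 ^ (p.1 + 1).toNat * p.2) 0

-- the body of A's 'for score, apeach in enumerate(info)' loop
def stepA (cands : List Int) (st : Int × Int × List Int) (p : Int × Int) : Int × Int × List Int :=
  if p.1 ∈ cands then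
    if p.2 < st.1 then
      (st.1 - (p.2 + 1), st.2.1 + (10 - p.1), PySem.List.pySetD st.2.2 p.1 (p.2 + 1))
    else
      (st.1 - 1, st.2.1 - (10 - p.1), PySem.List.pySetD st.2.2 p.1 1)
  else if p.2 ≠ 0 then (st.1, st.2.1 - (10 - p.1), st.2.2)
  else st

-- per-candidate-subset body of A's loops: returns (scores, balance)
def evalLeafA (n : Int) (info : List Int) (cands : List Int) : List Int × Int :=
  let st := (PySem.List.enumerate info 0).foldl (stepA cands) (n, 0, List.replicate 11 0)
  let scores :=
    if st.1 ≠ 0 then PySem.List.pySetD st.2.2 (-1) (PySem.List.pyGetD st.2.2 (-1) 0 + st.1)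
    else st.2.2
  (scores, st.2.1)

-- the biggest/answers bookkeeping of A
def considerA (st : Int × List (List Int)) (leaf : List Int × Int) : Int × List (List Int) :=
  if leaf.2 = st.1 then
    if !(st.2.any (· == leaf.1)) then (st.1, st.2 ++ [leaf.1]) else st
  else if leaf.2 > st.1 then (leaf.2, [leaf.1])
  else st

def solution (n : Int) (info : List Int) : List Int :=
  let st := (PySem.List.pyRange 1 12).foldl
    (fun st i =>
      (PySem.List.combinations (PySem.List.pyRange 0 11) i.toNat).foldl
        (fun st cands => considerA st (evalLeafA n info cands)) st)
    (1, ([] : List (List Int)))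
  if st.2 = [] then [-1]
  else
    let sums := st.2.map elemSumA
    match PySem.List.max? sums (fun x => x) with
    | none => [-1]
    | some m =>
      match PySem.List.index? sums m with
      | none => [-1]
      | some idx => st.2.getD idx [-1]

-- ===== PORT B =====
def elemSumB (scores : List Int) : Int :=
  (PySem.List.enumerate scores 0).foldl (fun acc p => acc + 10 ^ (p.1 + 1).toNat * p.2) 0

-- Python list '<' (lexicographic) on List Int
def listLtI : List Int → List Int → Bool
  | [], [] => false
  | [], _ :: _ => true
  | _ :: _, [] => false
  | a :: as, b :: bs => if a < b then true else if b < a then false else listLtI as bs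

-- Python tuple '<' on B's (Int, Int, Int, list) keys
def keyLt (k1 k2 : Int × Int × Int × List Int) : Bool :=
  listLtI (k1.1 :: k1.2.1 :: k1.2.2.1 :: k1.2.2.2) (k2.1 :: k2.2.1 :: k2.2.2.1 :: k2.2.2.2)

-- base = -sum(10 - z for z, a in enumerate(info) if a)
def baseB (info : List Int) : Int :=
  -((((PySem.List.enumerate info 0).filter (fun p => decide (p.2 ≠ 0))).map
      (fun p => 10 - p.1)).sum)

-- B's DFS over the zone list (scores always has length 11, so the pyGetD default is unused)
def leavesB : List (Int × Int) → Int → Int → List Int → List Int →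
    List (List Int × List Int × Int)
  | [], rem, bal, sc, wins =>
      [(wins, PySem.List.slice sc none (some 10) ++ [PySem.List.pyGetD sc 10 0 + rem], bal)]
  | (z, a) :: rest, rem, bal, sc, wins =>
      leavesB rest rem bal sc wins ++
      (if a < rem then
        leavesB rest (rem - (a + 1)) (if a ≠ 0 then bal + 2 * (10 - z) else bal + (10 - z))
          (PySem.List.slice sc none (some z) ++ [a + 1] ++ PySem.List.slice sc (some (z + 1)) none)
          (wins ++ [z])
      else
        leavesB rest (rem - 1) (if a ≠ 0 then bal else bal - (10 - z))
          (PySem.List.slice sc none (some z) ++ [1] ++ PySem.List.slice sc (some (z + 1)) none)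
          (wins ++ [z]))

-- B's best-leaf selection loop body
def bestStep (acc : Option ((Int × Int × Int × List Int) × List Int))
    (leaf : List Int × List Int × Int) : Option ((Int × Int × Int × List Int) × List Int) :=
  if leaf.1 = [] ∨ leaf.2.2 < 1 then acc
  else
    let key := (-leaf.2.2, -elemSumB leaf.2.1, (leaf.1.length : Int), leaf.1)
    match acc with
    | none => some (key, leaf.2.1)
    | some b => if keyLt key b.1 then some (key, leaf.2.1) else some b

def solution_alt (n : Int) (info : List Int) : List Int :=
  match (leavesB (PySem.List.enumerate (PySem.List.slice info none (some 11)) 0) n (baseB info)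
      (List.replicate 11 0) []).foldl bestStep none with
  | none => [-1]
  | some b => b.2

-- ===== PRECONDITION & SPEC =====
def Spec_solution (n : Int) (info : List Int) (out : List Int) : Prop := out = solution_alt n info
instance (n : Int) (info : List Int) (out : List Int) : Decidable (Spec_solution n info out) := by unfold Spec_solution; infer_instance

-- ===== CLAIM (what is proved, stated in full; the proofs are below) =====
def Claim_equal_solution : Prop := ∀ (n : Int) (info : List Int), Dom_solution n info → Spec_solution n info (solution n info)

-- ===== LEMMAS AND PROOFS =====

theorem listLtI_irrefl : ∀ l, listLtI l l = false := by
  intro l; induction l with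
  | nil => rfl
  | cons a as ih => simp [listLtI, ih]

theorem listLtI_trans : ∀ a b c, listLtI a b = true → listLtI b c = true → listLtI a c = true := by
  intro a
  induction a with
  | nil => intro b c h1 h2; cases b <;> cases c <;> simp_all [listLtI]
  | cons x xs ih =>
    intro b c h1 h2
    cases b with
    | nil => simp [listLtI] at h1
    | cons y ys =>
      cases c with
      | nil => simp [listLtI] at h2
      | cons z zs =>
        simp only [listLtI] at h1 h2 ⊢
        split_ifs at h1 h2 ⊢ <;> try (first | rfl | omega)
        exact ih ys zs h1 h2

theorem listLtI_antisymm : ∀ a b, listLtI a b = false → listLtI b a = false → a = b := by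
  intro a
  induction a with
  | nil => intro b h1 _; cases b with | nil => rfl | cons y ys => simp [listLtI] at h1
  | cons x xs ih =>
    intro b h1 h2
    cases b with
    | nil => simp [listLtI] at h2
    | cons y ys =>
      simp only [listLtI] at h1 h2
      split_ifs at h1 h2 <;> try omega
      have hxs := ih ys h1 h2
      have hx : x = y := by omega
      simp_all

theorem keyLt_irrefl (k : Int × Int × Int × List Int) : keyLt k k = false := by
  simp [keyLt, listLtI_irrefl]

theorem keyLt_trans {k1 k2 k3 : Int × Int × Int × List Int} :
    keyLt k1 k2 = true → keyLt k2 k3 = true → keyLt k1 k3 = true :=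
  fun h1 h2 => listLtI_trans _ _ _ h1 h2

theorem keyLt_antisymm {k1 k2 : Int × Int × Int × List Int} :
    keyLt k1 k2 = false → keyLt k2 k1 = false → k1 = k2 := by
  rintro h1 h2
  have := listLtI_antisymm _ _ h1 h2
  obtain ⟨a1,b1,c1,l1⟩ := k1; obtain ⟨a2,b2,c2,l2⟩ := k2
  simp_all

def okL (leaf : List Int × List Int × Int) : Prop := ¬(leaf.1 = [] ∨ leaf.2.2 < 1)

def keyOfL (leaf : List Int × List Int × Int) : Int × Int × Int × List Int :=
  (-leaf.2.2, -elemSumB leaf.2.1, (leaf.1.length : Int), leaf.1)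

theorem bfold_ne_none : ∀ (L : List (List Int × List Int × Int)) b,
    L.foldl bestStep (some b) ≠ none := by
  intro L
  induction L with
  | nil => simp
  | cons leaf L ih =>
    intro b
    simp only [List.foldl_cons, bestStep]
    split_ifs with h h2 <;> exact ih _

theorem bfold_none_iff : ∀ (L : List (List Int × List Int × Int)),
    L.foldl bestStep none = none ↔ ∀ leaf ∈ L, ¬ okL leaf := by
  intro L
  induction L with
  | nil => simp
  | cons leaf L ih =>
    simp only [List.foldl_cons, List.mem_cons]
    by_cases h : leaf.1 = [] ∨ leaf.2.2 < 1
    · rw [show bestStep none leaf = none by simp [bestStep, h]]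
      rw [ih]
      constructor
      · intro hall l hl; rcases hl with rfl | hl
        · simp [okL, h]
        · exact hall l hl
      · intro hall l hl; exact hall l (Or.inr hl)
    · rw [show bestStep none leaf = some (keyOfL leaf, leaf.2.1) by simp [bestStep, h, keyOfL]]
      constructor
      · intro hc; exact absurd hc (bfold_ne_none L _)
      · intro hall; exact absurd h (by have := hall leaf (Or.inl rfl); simpa [okL] using this)

theorem bfold_mem : ∀ (L : List (List Int × List Int × Int)) acc r,
    L.foldl bestStep acc = some r →
    acc = some r ∨ ∃ leaf ∈ L, okL leaf ∧ r = (keyOfL leaf, leaf.2.1) := by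
  intro L
  induction L with
  | nil => intro acc r h; exact Or.inl h
  | cons leaf L ih =>
    intro acc r h
    simp only [List.foldl_cons] at h
    rcases ih _ _ h with hacc | ⟨l, hl, hok, hr⟩
    · by_cases hko : leaf.1 = [] ∨ leaf.2.2 < 1
      · rw [show bestStep acc leaf = acc by simp [bestStep, hko]] at hacc; exact Or.inl hacc
      · match acc with
        | none =>
          rw [show bestStep none leaf = some (keyOfL leaf, leaf.2.1) by
            simp [bestStep, hko, keyOfL]] at hacc
          injection hacc with hacc
          exact Or.inr ⟨leaf, List.mem_cons_self .., ⟨hko, hacc.symm⟩⟩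
        | some b =>
          by_cases hk : keyLt (keyOfL leaf) b.1 = true
          · rw [show bestStep (some b) leaf = some (keyOfL leaf, leaf.2.1) by
              simp only [bestStep, if_neg hko]
              rw [if_pos (by simpa [keyOfL] using hk)]
              simp [keyOfL]] at hacc
            injection hacc with hacc
            exact Or.inr ⟨leaf, List.mem_cons_self .., ⟨hko, hacc.symm⟩⟩
          · rw [show bestStep (some b) leaf = some b by
              simp only [bestStep, if_neg hko]
              rw [if_neg (by simpa [keyOfL] using hk)]] at hacc
            exact Or.inl hacc
    · exact Or.inr ⟨l, List.mem_cons_of_mem _ hl, hok, hr⟩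

theorem bfold_min : ∀ (L : List (List Int × List Int × Int)) acc r,
    L.foldl bestStep acc = some r →
    (∀ b, acc = some b → keyLt b.1 r.1 = false) ∧
    (∀ l' ∈ L, okL l' → keyLt (keyOfL l') r.1 = false) := by
  intro L
  induction L with
  | nil =>
    intro acc r h
    simp only [List.foldl_nil] at h
    refine ⟨?_, by simp⟩
    rintro b hb; rw [h] at hb; injection hb with hb; rw [hb]; exact keyLt_irrefl _
  | cons leaf L ih =>
    intro acc r h
    simp only [List.foldl_cons] at h
    by_cases hko : leaf.1 = [] ∨ leaf.2.2 < 1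
    · rw [show bestStep acc leaf = acc by simp [bestStep, hko]] at h
      obtain ⟨h1, h2⟩ := ih _ _ h
      refine ⟨h1, ?_⟩
      intro l' hl' hok
      rcases List.mem_cons.1 hl' with rfl | hl'
      · exact absurd hko hok
      · exact h2 l' hl' hok
    · match hA : acc with
      | none =>
        rw [show bestStep none leaf = some (keyOfL leaf, leaf.2.1) by
          simp [bestStep, hko, keyOfL]] at h
        obtain ⟨h1, h2⟩ := ih _ _ h
        have hhead : keyLt (keyOfL leaf) r.1 = false := h1 _ rfl
        refine ⟨by simp, ?_⟩
        intro l' hl' hok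
        rcases List.mem_cons.1 hl' with rfl | hl'
        · exact hhead
        · exact h2 l' hl' hok
      | some b =>
        by_cases hk : keyLt (keyOfL leaf) b.1 = true
        · rw [show bestStep (some b) leaf = some (keyOfL leaf, leaf.2.1) by
            simp only [bestStep, if_neg hko]
            rw [if_pos (by simpa [keyOfL] using hk)]
            simp [keyOfL]] at h
          obtain ⟨h1, h2⟩ := ih _ _ h
          have hhead : keyLt (keyOfL leaf) r.1 = false := h1 _ rfl
          constructor
          · rintro b' hb'; injection hb' with hb'; subst hb'
            by_contra hbt
            simp only [Bool.not_eq_false] at hbt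
            have := keyLt_trans hk hbt
            rw [hhead] at this; cases this
          · intro l' hl' hok
            rcases List.mem_cons.1 hl' with rfl | hl'
            · exact hhead
            · exact h2 l' hl' hok
        · rw [show bestStep (some b) leaf = some b by
            simp only [bestStep, if_neg hko]
            rw [if_neg (by simpa [keyOfL] using hk)]] at h
          obtain ⟨h1, h2⟩ := ih _ _ h
          have hb : keyLt b.1 r.1 = false := h1 _ rfl
          constructor
          · rintro b' hb'; injection hb' with hb'; subst hb'; exact hb
          · intro l' hl' hok
            rcases List.mem_cons.1 hl' with rfl | hl'
            · -- ¬ keyLt key b, b ≤ r ⇒ ¬ keyLt key r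
              by_contra hkt
              simp only [Bool.not_eq_false] at hkt
              by_cases hbk : keyLt b.1 (keyOfL l') = true
              · have := keyLt_trans hbk hkt
                rw [hb] at this; cases this
              · have heq := keyLt_antisymm (by simpa using hk) (by simpa using hbk)
                rw [heq] at hkt; rw [hkt] at hb; cases hb
            · exact h2 l' hl' hok

def MB (P : List (List Int × Int)) : Int := P.foldl (fun m l => max m l.2) 1

def dedupGo (acc : List (List Int)) (l : List (List Int)) : List (List Int) :=
  l.foldl (fun a v => if v ∈ a then a else a ++ [v]) acc

theorem dedupGo_mem : ∀ (l acc : List (List Int)) (v : List Int),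
    v ∈ dedupGo acc l ↔ v ∈ acc ∨ v ∈ l := by
  intro l
  induction l with
  | nil => simp [dedupGo]
  | cons x t ih =>
    intro acc v
    simp only [dedupGo, List.foldl_cons]
    by_cases hx : x ∈ acc
    · rw [if_pos hx]
      rw [show List.foldl _ acc t = dedupGo acc t from rfl, ih]
      constructor
      · rintro (h | h)
        · exact Or.inl h
        · exact Or.inr (List.mem_cons_of_mem _ h)
      · rintro (h | h)
        · exact Or.inl h
        · rcases List.mem_cons.1 h with rfl | h
          · exact Or.inl hx
          · exact Or.inr h
    · rw [if_neg hx]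
      rw [show List.foldl _ (acc ++ [x]) t = dedupGo (acc ++ [x]) t from rfl, ih]
      simp [List.mem_append, List.mem_cons]
      tauto

theorem find?_dedupGo (p : List Int → Bool) : ∀ (l acc : List (List Int)),
    List.find? p (dedupGo acc l) = (List.find? p acc).or (List.find? p l) := by
  intro l
  induction l with
  | nil => simp [dedupGo]
  | cons x t ih =>
    intro acc
    simp only [dedupGo, List.foldl_cons]
    by_cases hx : x ∈ acc
    · rw [if_pos hx]
      rw [show List.foldl _ acc t = dedupGo acc t from rfl, ih]
      by_cases hpacc : (List.find? p acc).isSome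
      · obtain ⟨w, hw⟩ := Option.isSome_iff_exists.1 hpacc
        simp [hw]
      · have hnone : List.find? p acc = none := Option.not_isSome_iff_eq_none.1 hpacc
        have hpx : p x = false := by
          by_contra hc
          have := List.find?_isSome.2 ⟨x, hx, by simpa using hc⟩
          rw [hnone] at this; simp at this
        simp [hnone, List.find?_cons, hpx]
    · rw [if_neg hx]
      rw [show List.foldl _ (acc ++ [x]) t = dedupGo (acc ++ [x]) t from rfl, ih]
      rw [List.find?_append]
      simp only [List.find?_cons]
      cases hpx : p x <;> simp [Option.or_assoc]

theorem MB_append (P : List (List Int × Int)) (x : List Int × Int) :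
    MB (P ++ [x]) = max (MB P) x.2 := by
  simp [MB, List.foldl_append]

theorem MB_ge (P : List (List Int × Int)) : ∀ l ∈ P, l.2 ≤ MB P :=
  (PySem.List.le_foldl_max_int P (fun l => l.2) 1).2

theorem MB_one (P : List (List Int × Int)) : 1 ≤ MB P :=
  (PySem.List.le_foldl_max_int P (fun l => l.2) 1).1

theorem MB_cases (P : List (List Int × Int)) : MB P = 1 ∨ ∃ l ∈ P, l.2 = MB P := by
  have gen : ∀ (Q : List (List Int × Int)) (a : Int),
      Q.foldl (fun m l => max m l.2) a = a ∨ ∃ l ∈ Q, l.2 = Q.foldl (fun m l => max m l.2) a := by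
    intro Q
    induction Q with
    | nil => intro a; exact Or.inl rfl
    | cons x t ih =>
      intro a
      simp only [List.foldl_cons]
      rcases ih (max a x.2) with h | ⟨l, hl, hle⟩
      · rw [h]
        rcases max_cases a x.2 with ⟨hm, _⟩ | ⟨hm, _⟩
        · rw [hm]; exact Or.inl rfl
        · rw [hm]
          exact Or.inr ⟨x, List.mem_cons_self .., rfl⟩
      · exact Or.inr ⟨l, List.mem_cons_of_mem _ hl, hle⟩
  exact gen P 1

theorem considerA_inv : ∀ (P : List (List Int × Int)),
    P.foldl considerA (1, []) =
      (MB P, dedupGo [] ((P.filter (fun l => decide (l.2 = MB P))).map (·.1))) := by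
  intro P
  induction P using List.reverseRecOn with
  | nil => simp [MB, dedupGo]
  | append_singleton P x ih =>
    rw [List.foldl_append, List.foldl_cons, List.foldl_nil, ih]
    rcases lt_trichotomy x.2 (MB P) with hc | hc | hc
    · have hMB : MB (P ++ [x]) = MB P := by rw [MB_append]; omega
      have hfil : (P ++ [x]).filter (fun l => decide (l.2 = MB (P ++ [x])))
          = P.filter (fun l => decide (l.2 = MB P)) := by
        rw [hMB, List.filter_append]
        simp [show ¬ (x.2 = MB P) by omega]
      rw [hfil, hMB]
      simp only [considerA, if_neg (by omega : ¬ (x.2 = MB P)), if_neg (by omega : ¬ (x.2 > MB P))]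
    · have hMB : MB (P ++ [x]) = MB P := by rw [MB_append]; omega
      have hfil : (P ++ [x]).filter (fun l => decide (l.2 = MB (P ++ [x])))
          = P.filter (fun l => decide (l.2 = MB P)) ++ [x] := by
        rw [hMB, List.filter_append]
        simp [hc]
      rw [hfil, hMB, List.map_append]
      simp only [List.map_cons, List.map_nil]
      rw [show ∀ V, dedupGo [] (V ++ [x.1]) =
            (if x.1 ∈ dedupGo [] V then dedupGo [] V else dedupGo [] V ++ [x.1]) from
        fun V => by simp [dedupGo, List.foldl_append]]
      simp only [considerA, if_pos hc]
      by_cases hmem : x.1 ∈ dedupGo [] ((P.filter (fun l => decide (l.2 = MB P))).map (·.1))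
      · rw [if_pos hmem]
        rw [show (List.any _ (· == x.1)) = true by
          rw [List.any_beq']; exact List.contains_iff_mem.2 hmem]
        simp
      · rw [if_neg hmem]
        rw [show (List.any _ (· == x.1)) = false by
          rw [List.any_beq']
          exact Bool.not_eq_true _ ▸ (by simpa [List.contains_iff_mem] using hmem)]
        simp
    · have hMB : MB (P ++ [x]) = x.2 := by rw [MB_append]; omega
      have hfil : (P ++ [x]).filter (fun l => decide (l.2 = MB (P ++ [x]))) = [x] := by
        rw [hMB, List.filter_append]
        rw [List.filter_eq_nil_iff.2 (fun l hl => by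
          have := MB_ge P l hl; simp; omega)]
        simp
      rw [hfil, hMB]
      simp only [considerA, if_neg (by omega : ¬ (x.2 = MB P)), if_pos (by omega : x.2 > MB P)]
      simp [dedupGo]

def tailA (answers : List (List Int)) : List Int :=
  if answers = [] then [-1]
  else
    let sums := answers.map elemSumA
    match PySem.List.max? sums (fun x => x) with
    | none => [-1]
    | some m =>
      match PySem.List.index? sums m with
      | none => [-1]
      | some idx => answers.getD idx [-1]

theorem index_map_find : ∀ (l : List (List Int)) (M : Int) (i : Nat),
    PySem.List.index? (l.map elemSumA) M = some i →
    l.find? (fun v => elemSumA v == M) = some (l.getD i [-1]) := by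
  intro l
  induction l with
  | nil => intro M i h; simp [PySem.List.index?_eq_idxOf?] at h
  | cons v t ih =>
    intro M i h
    by_cases hv : elemSumA v = M
    · rw [List.map_cons, hv, PySem.List.index?_cons_self] at h
      injection h with h
      subst h
      simp [List.find?_cons, hv]
    · rw [List.map_cons, PySem.List.index?_cons_of_ne _ hv] at h
      obtain ⟨j, hj, rfl⟩ := Option.map_eq_some_iff.1 h
      have hvf : (elemSumA v == M) = false := by simpa using hv
      simp only [List.find?_cons, hvf]
      rw [ih M j hj]
      simp

theorem tailA_spec (P : List (List Int × Int)) (hne : ∃ l ∈ P, 1 ≤ l.2) :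
    ∃ (xl : List Int × Int) (M : Int),
      P.find? (fun l => decide (l.2 = MB P) && (elemSumA l.1 == M)) = some xl ∧
      tailA (dedupGo [] ((P.filter (fun l => decide (l.2 = MB P))).map (·.1))) = xl.1 ∧
      elemSumA xl.1 = M ∧ xl.2 = MB P ∧
      (∀ l ∈ P, l.2 = MB P → elemSumA l.1 ≤ M) := by
  obtain ⟨l0, hl0, hl02⟩ := hne
  have hMBatt : ∃ l ∈ P, l.2 = MB P := by
    rcases MB_cases P with h1 | h
    · exact ⟨l0, hl0, le_antisymm (h1 ▸ MB_ge P l0 hl0) (h1 ▸ hl02)⟩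
    · exact h
  obtain ⟨la, hla, hla2⟩ := hMBatt
  set V := (P.filter (fun l => decide (l.2 = MB P))).map (·.1) with hV
  set answers := dedupGo [] V with hans
  have hVmem : la.1 ∈ V := List.mem_map_of_mem (List.mem_filter.2 ⟨hla, by simp [hla2]⟩)
  have hansmem : la.1 ∈ answers := (dedupGo_mem V [] la.1).2 (Or.inr hVmem)
  have hansne : answers ≠ [] := fun hc => by rw [hc] at hansmem; cases hansmem
  have hsumne : answers.map elemSumA ≠ [] := by simpa using hansne
  obtain ⟨M, hM⟩ : ∃ M, PySem.List.max? (answers.map elemSumA) (fun x => x) = some M := by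
    rcases h : PySem.List.max? (answers.map elemSumA) (fun x => x) with _ | M
    · exact absurd ((PySem.List.max?_eq_none_iff _ _).1 h) (by simpa using hansne)
    · exact ⟨M, rfl⟩
  have hMmem : M ∈ answers.map elemSumA := PySem.List.max?_mem hM
  have hMmax : ∀ y ∈ answers.map elemSumA, y ≤ M := fun y hy => PySem.List.max?_isMax hM y hy
  obtain ⟨idx, hidx⟩ : ∃ i, PySem.List.index? (answers.map elemSumA) M = some i := by
    rcases h : PySem.List.index? (answers.map elemSumA) M with _ | i
    · have := (PySem.List.index?_isSome_iff (answers.map elemSumA) M).2 hMmem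
      rw [h] at this; cases this
    · exact ⟨i, rfl⟩
  have hfind := index_map_find answers M idx hidx
  have hfd : answers.find? (fun v => elemSumA v == M) = V.find? (fun v => elemSumA v == M) := by
    rw [hans, find?_dedupGo]; simp
  have hfm : V.find? (fun v => elemSumA v == M)
      = ((P.filter (fun l => decide (l.2 = MB P))).find?
          ((fun v => elemSumA v == M) ∘ (·.1))).map (·.1) := by
    rw [hV, List.find?_map]
  have hff : (P.filter (fun l => decide (l.2 = MB P))).find? ((fun v => elemSumA v == M) ∘ (·.1))
      = P.find? (fun l => decide (l.2 = MB P) && (elemSumA l.1 == M)) := by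
    rw [List.find?_filter]
    congr 1
    funext l
    simp only [Bool.decide_and]
    cases h2 : (elemSumA l.1 == M) <;> simp_all
  rw [hfd, hfm, hff] at hfind
  obtain ⟨xl, hxl, hxl1⟩ := Option.map_eq_some_iff.1 hfind
  have hpred := List.find?_some hxl
  simp only [Bool.and_eq_true, decide_eq_true_eq, beq_iff_eq] at hpred
  refine ⟨xl, M, hxl, ?_, hpred.2, hpred.1, ?_⟩
  · rw [tailA, if_neg hansne]
    simp only [hM, hidx]
    rw [hxl1]
  · intro l hl hlMB
    exact hMmax (elemSumA l.1) (List.mem_map_of_mem ((dedupGo_mem V [] l.1).2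
      (Or.inr (List.mem_map_of_mem (List.mem_filter.2 ⟨hl, by simp [hlMB]⟩)))))

-- A-side per-zone step / run (balance bookkeeping as in A)
def stepZ (info : List Int) (z : Nat) (win : Bool) (st : Int × Int × List Int) : Int × Int × List Int :=
  match info[z]? with
  | none => st
  | some a =>
    if win then
      if a < st.1 then
        (st.1 - (a+1), st.2.1 + (10 - (z:Int)), st.2.2.take z ++ [a+1] ++ st.2.2.drop (z+1))
      else
        (st.1 - 1, st.2.1 - (10 - (z:Int)), st.2.2.take z ++ [1] ++ st.2.2.drop (z+1))
    else if a ≠ 0 then (st.1, st.2.1 - (10 - (z:Int)), st.2.2)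
    else st

def runFrom (info : List Int) (T : List Int) (z : Nat) (st : Int × Int × List Int) :
    Int × Int × List Int :=
  if 11 ≤ z then st
  else runFrom info T (z+1) (stepZ info z (decide ((z:Int) ∈ T)) st)
  termination_by 11 - z

-- extraA = -sum(10 - z for z, a in enumerate(info) if z >= 11 and a)  (the suffix part of A's balance)
def extraA (info : List Int) : Int :=
  -((((PySem.List.enumerate info 0).filter
        (fun p => decide (11 ≤ p.1) && decide (p.2 ≠ 0))).map (fun p => 10 - p.1)).sum)

def evC (n : Int) (info : List Int) (T : List Int) : List Int × Int :=
  let r := runFrom info T 0 (n, 0, List.replicate 11 0)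
  (r.2.2.take 10 ++ [r.2.2.getD 10 0 + r.1], r.2.1 + extraA info)

theorem runFrom_stop (info T : List Int) (z : Nat) (st : Int × Int × List Int) (h : 11 ≤ z) :
    runFrom info T z st = st := by
  rw [runFrom, if_pos h]

theorem stepZ_id (info : List Int) (z : Nat) (w : Bool) (st : Int × Int × List Int)
    (h : info.length ≤ z) : stepZ info z w st = st := by
  rw [stepZ]
  rw [List.getElem?_eq_none (by omega)]

theorem runFrom_congr : ∀ (k z : Nat), 11 - z = k → ∀ (info T1 T2 : List Int) st,
    (∀ j : Nat, z ≤ j → j < info.length → ((j:Int) ∈ T1 ↔ (j:Int) ∈ T2)) →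
    runFrom info T1 z st = runFrom info T2 z st := by
  intro k
  induction k with
  | zero =>
    intro z hz info T1 T2 st _
    rw [runFrom_stop _ _ _ _ (by omega), runFrom_stop _ _ _ _ (by omega)]
  | succ k ih =>
    intro z hz info T1 T2 st hmem
    conv_lhs => rw [runFrom]
    conv_rhs => rw [runFrom]
    simp only [if_neg (show ¬ 11 ≤ z by omega)]
    by_cases hzl : z < info.length
    · rw [show decide ((z:Int) ∈ T1) = decide ((z:Int) ∈ T2) by
        simp only [decide_eq_decide]; exact hmem z le_rfl hzl]
      exact ih (z+1) (by omega) info T1 T2 _ (fun j hj hjl => hmem j (by omega) hjl)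
    · rw [stepZ_id _ _ _ _ (by omega), stepZ_id _ _ _ _ (by omega)]
      exact ih (z+1) (by omega) info T1 T2 _ (fun j hj hjl => hmem j (by omega) hjl)

theorem stepZ_len (info : List Int) (z : Nat) (w : Bool) (st : Int × Int × List Int)
    (hlen : st.2.2.length = 11) (hz : z < 11) : (stepZ info z w st).2.2.length = 11 := by
  rw [stepZ]
  cases h : info[z]? with
  | none => exact hlen
  | some a =>
    cases w <;> simp only [Bool.false_eq_true, if_false, if_true]
    · split_ifs <;> simp [hlen]
    · split_ifs <;> simp [List.length_take, List.length_drop, hlen] <;> omega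

theorem runFrom_len : ∀ (k z : Nat), 11 - z = k → ∀ (info T : List Int) st,
    st.2.2.length = 11 → (runFrom info T z st).2.2.length = 11 := by
  intro k
  induction k with
  | zero => intro z hz info T st h; rw [runFrom_stop _ _ _ _ (by omega)]; exact h
  | succ k ih =>
    intro z hz info T st h
    rw [runFrom, if_neg (by omega)]
    exact ih (z+1) (by omega) info T _ (stepZ_len info z _ st h (by omega))

theorem runFrom_ge_len : ∀ (k z : Nat), 11 - z = k → ∀ (info T : List Int) st,
    info.length ≤ z → runFrom info T z st = st := by
  intro k
  induction k with
  | zero => intro z hz info T st _; exact runFrom_stop _ _ _ _ (by omega)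
  | succ k ih =>
    intro z hz info T st hge
    rw [runFrom, if_neg (by omega), stepZ_id _ _ _ _ hge]
    exact ih (z+1) (by omega) info T st (by omega)

theorem stepA_eq_stepZ (info T : List Int) (z : Nat) (st : Int × Int × List Int)
    (hz11 : z < 11) (hlen : st.2.2.length = 11) (hz : z < info.length) :
    stepA T st ((z:Int), info[z]) = stepZ info z (decide ((z:Int) ∈ T)) st := by
  rw [stepZ, List.getElem?_eq_getElem hz]
  have hset : ∀ v : Int, PySem.List.pySetD st.2.2 (z:Int) v
      = st.2.2.take z ++ [v] ++ st.2.2.drop (z+1) := by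
    intro v
    rw [PySem.List.pySetD_natCast, List.set_eq_take_append_cons_drop, if_pos (by omega)]
    simp
  by_cases hm : (z:Int) ∈ T
  · rw [show decide ((z:Int) ∈ T) = true by simpa using hm]
    simp only [stepA, if_pos hm]
    split_ifs <;> simp [hset]
  · rw [show decide ((z:Int) ∈ T) = false by simpa using hm]
    simp only [stepA, if_neg hm]
    split_ifs <;> first | rfl | simp_all

theorem prefA : ∀ (k z : Nat), 11 - z = k → ∀ (info T : List Int) (st : Int × Int × List Int),
    st.2.2.length = 11 →
    List.foldl (stepA T) st (PySem.List.enumerate ((info.take 11).drop z) (z:Int))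
      = runFrom info T z st := by
  intro k
  induction k with
  | zero =>
    intro z hz info T st _
    rw [List.drop_eq_nil_of_le (by simp [List.length_take]; omega), PySem.List.enumerate_nil,
      List.foldl_nil, runFrom_stop _ _ _ _ (by omega)]
  | succ k ih =>
    intro z hz info T st hlen
    by_cases hzl : z < info.length
    · have hzt : z < (info.take 11).length := by simp [List.length_take]; omega
      rw [show runFrom info T z st
            = runFrom info T (z+1) (stepZ info z (decide ((z:Int) ∈ T)) st) from by
        rw [runFrom, if_neg (by omega)]]
      rw [List.drop_eq_getElem_cons hzt, PySem.List.enumerate_cons, List.foldl_cons]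
      rw [List.getElem_take]
      rw [stepA_eq_stepZ info T z st (by omega) hlen hzl]
      have hcast : ((z:Int) + 1) = (((z+1:Nat)):Int) := by push_cast; ring
      rw [hcast, ih (z+1) (by omega) info T _ (stepZ_len info z _ st hlen (by omega))]
    · rw [List.drop_eq_nil_of_le (by simp [List.length_take]; omega), PySem.List.enumerate_nil,
        List.foldl_nil, runFrom_ge_len (11 - z) z rfl info T st (by omega)]

theorem sufA : ∀ (l : List (Int × Int)) (T : List Int) (st : Int × Int × List Int),
    (∀ p ∈ l, (11:Int) ≤ p.1) → (∀ x ∈ T, x < 11) →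
    List.foldl (stepA T) st l
      = (st.1,
         st.2.1 - ((l.filter (fun p => decide (11 ≤ p.1) && decide (p.2 ≠ 0))).map
           (fun p => 10 - p.1)).sum,
         st.2.2) := by
  intro l
  induction l with
  | nil => intro T st _ _; simp
  | cons p t ih =>
    intro T st hge hT
    have hp1 : (11:Int) ≤ p.1 := hge p (List.mem_cons_self ..)
    have hnm : p.1 ∉ T := fun hc => by have := hT p.1 hc; omega
    rw [List.foldl_cons]
    by_cases hp2 : p.2 ≠ 0
    · rw [show stepA T st p = (st.1, st.2.1 - (10 - p.1), st.2.2) by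
        simp only [stepA, if_neg hnm, if_pos hp2]]
      rw [ih T _ (fun q hq => hge q (List.mem_cons_of_mem _ hq)) hT]
      rw [List.filter_cons, if_pos (by simp [hp1, hp2])]
      simp only [List.map_cons, List.sum_cons]
      refine Prod.ext rfl (Prod.ext ?_ rfl)
      simp only
      ring
    · rw [show stepA T st p = st by
        simp only [stepA, if_neg hnm, if_neg hp2]]
      rw [ih T st (fun q hq => hge q (List.mem_cons_of_mem _ hq)) hT]
      rw [List.filter_cons, if_neg (by simp [hp2])]

theorem scoresFin (sc : List Int) (rem : Int) (hlen : sc.length = 11) :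
    (if rem ≠ 0 then PySem.List.pySetD sc (-1) (PySem.List.pyGetD sc (-1) 0 + rem) else sc)
      = sc.take 10 ++ [sc.getD 10 0 + rem] := by
  have hne : sc ≠ [] := by intro hc; rw [hc] at hlen; cases hlen
  have hgetD : sc.getD 10 0 = sc[10]'(by omega) := List.getD_eq_getElem sc 0 (by omega)
  have hget : PySem.List.pyGetD sc (-1) 0 = sc.getD 10 0 := by
    rw [PySem.List.pyGetD_neg_one sc 0 hne, List.getLast_eq_getElem, hgetD]
    congr 1
    omega
  have hset : ∀ v : Int, PySem.List.pySetD sc (-1) v = sc.take 10 ++ [v] := by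
    intro v
    have h10 : PySem.List.pySetD sc (-1) v = sc.set 10 v := by
      simp [PySem.List.pySetD, PySem.List.pySet?, PySem.List.pyIdx?, hlen]
    rw [h10, List.set_eq_take_append_cons_drop, if_pos (by omega),
      List.drop_eq_nil_of_le (by omega)]
  by_cases hrem : rem ≠ 0
  · rw [if_pos hrem, hset, hget]
  · rw [if_neg hrem]
    push_neg at hrem
    subst hrem
    rw [add_zero, hgetD]
    conv_lhs => rw [← List.take_append_drop 10 sc]
    congr 1
    rw [List.drop_eq_getElem_cons (by omega), List.drop_eq_nil_of_le (by omega)]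

theorem evalA_eq (n : Int) (info T : List Int) (hT : ∀ x ∈ T, (0:Int) ≤ x ∧ x < 11) :
    evalLeafA n info T = evC n info T := by
  have hsplit : PySem.List.enumerate info 0
      = PySem.List.enumerate (info.take 11) 0 ++
        PySem.List.enumerate (info.drop 11) (0 + (info.take 11).length) := by
    conv_lhs => rw [← List.take_append_drop 11 info]
    rw [PySem.List.enumerate_append]
  have hsufge : ∀ p ∈ PySem.List.enumerate (info.drop 11) (0 + (info.take 11).length),
      (11:Int) ≤ p.1 := by
    intro p hp
    obtain ⟨kk, hk, rfl⟩ := (PySem.List.mem_enumerate_iff _ _ _).1 hp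
    simp only [List.length_drop] at hk
    simp only [List.length_take]
    push_cast
    omega
  have hTlt : ∀ x ∈ T, x < (11:Int) := fun x hx => (hT x hx).2
  have hprefix_filter : (PySem.List.enumerate (info.take 11) 0).filter
      (fun p => decide (11 ≤ p.1) && decide (p.2 ≠ 0)) = [] := by
    rw [List.filter_eq_nil_iff]
    intro p hp
    obtain ⟨kk, hk, rfl⟩ := (PySem.List.mem_enumerate_iff _ _ _).1 hp
    simp only [List.length_take] at hk
    simp only [Bool.and_eq_true, decide_eq_true_eq, not_and]
    intro hc
    exfalso
    omega
  have hextra : extraA info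
      = -(((PySem.List.enumerate (info.drop 11) (0 + (info.take 11).length)).filter
            (fun p => decide (11 ≤ p.1) && decide (p.2 ≠ 0))).map (fun p => 10 - p.1)).sum := by
    rw [extraA, hsplit, List.filter_append, hprefix_filter, List.nil_append]
  rw [evalLeafA, hsplit, List.foldl_append]
  have hpref := prefA 11 0 rfl info T (n, 0, List.replicate 11 0) (by simp)
  simp only [List.drop_zero, Int.natCast_zero] at hpref
  rw [hpref]
  set r := runFrom info T 0 (n, 0, List.replicate 11 0) with hr
  rw [sufA _ T r hsufge hTlt]
  have hlen : r.2.2.length = 11 := runFrom_len 11 0 rfl info T _ (by simp)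
  rw [evC]
  simp only
  rw [scoresFin r.2.2 r.1 hlen]
  refine Prod.ext rfl ?_
  simp only
  rw [hextra]
  ring

def LAsubs : List (List Int) :=
  (PySem.List.pyRange 1 12).flatMap
    (fun i => PySem.List.combinations (PySem.List.pyRange 0 11) i.toNat)

theorem LA_mem (c : List Int) : c ∈ LAsubs ↔ c.Sublist (PySem.List.pyRange 0 11) ∧ c ≠ [] := by
  simp only [LAsubs, List.mem_flatMap]
  constructor
  · rintro ⟨i, hi, hc⟩
    obtain ⟨hsub, hlen⟩ := (PySem.List.mem_combinations_iff _ _ _).1 hc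
    have hi' := (PySem.List.mem_pyRange_one).1 hi
    refine ⟨hsub, ?_⟩
    intro hnil
    rw [hnil] at hlen
    simp at hlen
    omega
  · rintro ⟨hsub, hne⟩
    have hlen2 : c.length ≤ 11 := by
      have := hsub.length_le
      simpa [PySem.List.length_pyRange_one] using this
    have hpos : 1 ≤ c.length := by
      cases c with
      | nil => exact absurd rfl hne
      | cons a t => simp
    refine ⟨(c.length : Int), ?_, ?_⟩
    · rw [PySem.List.mem_pyRange_one]
      omega
    · rw [PySem.List.mem_combinations_iff]
      exact ⟨hsub, by simp⟩

theorem combs_head_mem {d xs : List Int} {r : Nat} (h : d ∈ PySem.List.combinations xs (r+1)) :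
    ∃ y d', d = y :: d' ∧ y ∈ xs := by
  obtain ⟨hsub, hlen⟩ := (PySem.List.mem_combinations_iff _ _ _).1 h
  cases d with
  | nil => simp at hlen
  | cons y d' => exact ⟨y, d', rfl, hsub.subset (List.mem_cons_self ..)⟩

theorem combs_pairwise : ∀ (xs : List Int) (r : Nat), xs.Pairwise (· < ·) →
    (PySem.List.combinations xs r).Pairwise (fun c d => listLtI c d = true) := by
  intro xs
  induction xs with
  | nil =>
    intro r _
    cases r with
    | zero => rw [PySem.List.combinations_zero]; simp
    | succ r => rw [PySem.List.combinations_nil_succ]; simp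
  | cons x xs ih =>
    intro r hp
    cases r with
    | zero => rw [PySem.List.combinations_zero]; simp
    | succ r =>
      rw [PySem.List.combinations_cons_succ]
      have hp' : xs.Pairwise (· < ·) := (List.pairwise_cons.1 hp).2
      have hx : ∀ y ∈ xs, x < y := (List.pairwise_cons.1 hp).1
      rw [List.pairwise_append]
      refine ⟨?_, ih (r+1) hp', ?_⟩
      · rw [List.pairwise_map]
        exact (ih r hp').imp (fun h => by simpa [listLtI, lt_irrefl] using h)
      · intro a ha b hb
        obtain ⟨c, hc, rfl⟩ := List.mem_map.1 ha
        obtain ⟨y, d', rfl, hy⟩ := combs_head_mem hb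
        have hxy : x < y := hx y hy
        simp [listLtI, hxy]

def rankLt (c d : List Int) : Prop :=
  c.length < d.length ∨ (c.length = d.length ∧ listLtI c d = true)

theorem LA_pairwise : LAsubs.Pairwise rankLt := by
  rw [LAsubs, List.pairwise_flatMap]
  constructor
  · intro i _
    have hp : (PySem.List.pyRange 0 11).Pairwise (· < ·) :=
      PySem.List.pairwise_lt_pyRange_one 0 11
    refine List.Pairwise.imp_of_mem ?_ (combs_pairwise (PySem.List.pyRange 0 11) i.toNat hp)
    intro c d hc hd h
    have h1 := ((PySem.List.mem_combinations_iff _ _ _).1 hc).2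
    have h2 := ((PySem.List.mem_combinations_iff _ _ _).1 hd).2
    exact Or.inr ⟨by rw [h1, h2], h⟩
  · have hp : (PySem.List.pyRange 1 12).Pairwise (· < ·) :=
      PySem.List.pairwise_lt_pyRange_one 1 12
    refine List.Pairwise.imp_of_mem ?_ hp
    intro i j hi hj hij c hc d hd
    have h1 := ((PySem.List.mem_combinations_iff _ _ _).1 hc).2
    have h2 := ((PySem.List.mem_combinations_iff _ _ _).1 hd).2
    have hi' := (PySem.List.mem_pyRange_one).1 hi
    have hj' := (PySem.List.mem_pyRange_one).1 hj
    exact Or.inl (by rw [h1, h2]; omega)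

theorem sumAB_eq (l : List Int) : elemSumB l = elemSumA l := rfl

theorem corr1 (n : Int) (info : List Int) : ∀ c ∈ LAsubs, evalLeafA n info c = evC n info c := by
  intro c hc
  obtain ⟨hsub, -⟩ := (LA_mem c).1 hc
  refine evalA_eq n info c (fun x hx => ?_)
  exact (PySem.List.mem_pyRange_one).1 (hsub.subset hx)

theorem listLtI_cons_lt {a b : Int} (l1 l2 : List Int) (h : a < b) :
    listLtI (a :: l1) (b :: l2) = true := by simp [listLtI, h]

theorem listLtI_cons_eq (a : Int) (l1 l2 : List Int) :
    listLtI (a :: l1) (a :: l2) = listLtI l1 l2 := by simp [listLtI]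

-- ===== B-side machinery =====
-- the zones B's DFS actually branches on: indices 0..mB-1
def mB (info : List Int) : Nat := min 11 info.length

def subsB (info : List Int) (z : Nat) : List (List Int) :=
  if mB info ≤ z then [[]]
  else subsB info (z+1) ++ (subsB info (z+1)).map ((z:Int) :: ·)
  termination_by mB info - z

-- B's per-zone delta step (balance relative to baseB)
def stepB (info : List Int) (z : Nat) (win : Bool) (st : Int × Int × List Int) :
    Int × Int × List Int :=
  match info[z]? with
  | none => st
  | some a =>
    if win then
      if a < st.1 then
        (st.1 - (a+1),
         (if a ≠ 0 then st.2.1 + 2 * (10 - (z:Int)) else st.2.1 + (10 - (z:Int))),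
         st.2.2.take z ++ [a+1] ++ st.2.2.drop (z+1))
      else
        (st.1 - 1,
         (if a ≠ 0 then st.2.1 else st.2.1 - (10 - (z:Int))),
         st.2.2.take z ++ [1] ++ st.2.2.drop (z+1))
    else st

def runB (info : List Int) (T : List Int) (z : Nat) (st : Int × Int × List Int) :
    Int × Int × List Int :=
  if mB info ≤ z then st
  else runB info T (z+1) (stepB info z (decide ((z:Int) ∈ T)) st)
  termination_by mB info - z

def epsZ (info : List Int) (z : Nat) : Int :=
  match info[z]? with
  | none => 0
  | some a => if a ≠ 0 then 10 - (z:Int) else 0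

def skipS (info : List Int) (z : Nat) : Int :=
  if mB info ≤ z then 0 else epsZ info z + skipS info (z+1)
  termination_by mB info - z

theorem subsB_mem (info : List Int) : ∀ (k z : Nat), mB info - z = k →
    ∀ T, T ∈ subsB info z ↔ T.Sublist (PySem.List.pyRange (z:Int) (mB info : Int)) := by
  intro k
  induction k with
  | zero =>
    intro z hz T
    have h11 : mB info ≤ z := by omega
    rw [subsB, if_pos h11, PySem.List.pyRange_one_eq_nil (by exact_mod_cast h11)]
    simp
  | succ k ih =>
    intro z hz T
    have hlt : z < mB info := by omega
    rw [subsB, if_neg (by omega)]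
    rw [PySem.List.pyRange_one_cons (by exact_mod_cast hlt)]
    rw [List.sublist_cons_iff]
    have hcast : ((z:Int) + 1) = (((z+1 : Nat)):Int) := by push_cast; ring
    rw [hcast]
    simp only [List.mem_append, List.mem_map]
    constructor
    · rintro (h | ⟨T', hT', rfl⟩)
      · exact Or.inl ((ih (z+1) (by omega) T).1 h)
      · exact Or.inr ⟨T', rfl, (ih (z+1) (by omega) T').1 hT'⟩
    · rintro (h | ⟨r, rfl, hr⟩)
      · exact Or.inl ((ih (z+1) (by omega) T).2 h)
      · exact Or.inr ⟨r, (ih (z+1) (by omega) r).2 hr, rfl⟩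

theorem subsB_bounds {info : List Int} {z : Nat} {T : List Int} (h : T ∈ subsB info z) :
    ∀ x ∈ T, (z:Int) ≤ x ∧ x < (mB info : Int) := by
  intro x hx
  have hs := (subsB_mem info (mB info - z) z rfl T).1 h
  have := hs.subset hx
  exact (PySem.List.mem_pyRange_one).1 this

theorem notMem_of_subsB_succ {info : List Int} {z : Nat} {T : List Int}
    (hT : T ∈ subsB info (z+1)) : (z:Int) ∉ T := by
  intro hc
  have := (subsB_bounds hT _ hc).1
  push_cast at this
  omega

theorem stepB_false (info : List Int) (z : Nat) (st : Int × Int × List Int) :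
    stepB info z false st = st := by
  rw [stepB]
  cases info[z]? <;> rfl

theorem runB_stop (info T : List Int) (z : Nat) (st : Int × Int × List Int)
    (h : mB info ≤ z) : runB info T z st = st := by
  rw [runB, if_pos h]

theorem runB_congr (info : List Int) : ∀ (k z : Nat), mB info - z = k → ∀ (T1 T2 : List Int) st,
    (∀ j : Nat, z ≤ j → ((j:Int) ∈ T1 ↔ (j:Int) ∈ T2)) →
    runB info T1 z st = runB info T2 z st := by
  intro k
  induction k with
  | zero =>
    intro z hz T1 T2 st _
    rw [runB_stop _ _ _ _ (by omega), runB_stop _ _ _ _ (by omega)]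
  | succ k ih =>
    intro z hz T1 T2 st hmem
    conv_lhs => rw [runB]
    conv_rhs => rw [runB]
    simp only [if_neg (show ¬ mB info ≤ z by omega)]
    rw [show decide ((z:Int) ∈ T1) = decide ((z:Int) ∈ T2) by
      simp only [decide_eq_decide]; exact hmem z le_rfl]
    exact ih (z+1) (by omega) T1 T2 _ (fun j hj => hmem j (by omega))

theorem runB_skip {info T : List Int} {z : Nat} (hz : z < mB info) (hnot : (z:Int) ∉ T)
    (st : Int × Int × List Int) :
    runB info T z st = runB info T (z+1) st := by
  rw [runB, if_neg (by omega)]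
  rw [show decide ((z:Int) ∈ T) = false by simpa using hnot, stepB_false]

theorem runB_win {info T : List Int} {z : Nat} (hz : z < mB info) (hT : T ∈ subsB info (z+1))
    (st : Int × Int × List Int) :
    runB info ((z:Int) :: T) z st = runB info T (z+1) (stepB info z true st) := by
  rw [runB, if_neg (by omega)]
  rw [show decide ((z:Int) ∈ (z:Int) :: T) = true by simp]
  exact runB_congr info (mB info - (z+1)) (z+1) rfl _ T _ (fun j hj => by
    simp only [List.mem_cons]
    constructor
    · rintro (h | h)
      · exfalso
        have hjz : j = z := by exact_mod_cast h
        omega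
      · exact h
    · exact fun h => Or.inr h)

-- slice bridges on natural bounds
theorem slice10 (sc : List Int) : PySem.List.slice sc none (some 10) = sc.take 10 := by
  rw [show (10:Int) = ((10:Nat):Int) from by norm_num]
  exact PySem.List.slice_to_natCast ..

theorem sliceZ (sc : List Int) (z : Nat) :
    PySem.List.slice sc none (some (z:Int)) = sc.take z :=
  PySem.List.slice_to_natCast ..

theorem sliceZ' (sc : List Int) (z : Nat) :
    PySem.List.slice sc (some ((z:Int) + 1)) none = sc.drop (z+1) := by
  rw [show ((z:Int) + 1) = (((z+1:Nat)):Int) from by push_cast; ring]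
  exact PySem.List.slice_from_natCast ..

theorem pyGetD10 (sc : List Int) : PySem.List.pyGetD sc 10 0 = sc.getD 10 0 := by
  rw [show (10:Int) = ((10:Nat):Int) from by norm_num]
  rw [PySem.List.pyGetD_natCast]

theorem leavesB_spec (info : List Int) : ∀ (k z : Nat), mB info - z = k →
    ∀ (rem bal : Int) (sc W : List Int),
    leavesB (PySem.List.enumerate ((info.take 11).drop z) (z:Int)) rem bal sc W
      = (subsB info z).map (fun T =>
          (W ++ T,
           (runB info T z (rem, bal, sc)).2.2.take 10 ++
             [(runB info T z (rem, bal, sc)).2.2.getD 10 0 + (runB info T z (rem, bal, sc)).1],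
           (runB info T z (rem, bal, sc)).2.1)) := by
  intro k
  induction k with
  | zero =>
    intro z hz rem bal sc W
    have hdrop : (info.take 11).drop z = [] :=
      List.drop_eq_nil_of_le (by simp [List.length_take, mB] at hz ⊢; omega)
    rw [hdrop, PySem.List.enumerate_nil, subsB, if_pos (by omega)]
    simp only [List.map_cons, List.map_nil, List.append_nil]
    rw [leavesB, slice10, pyGetD10]
    simp [runB_stop _ _ _ _ (by omega : mB info ≤ z)]
  | succ k ih =>
    intro z hz rem bal sc W
    have hzlt : z < mB info := by omega
    have hzl : z < info.length := by simp [mB] at hzlt; omega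
    have hzt : z < (info.take 11).length := by simp [List.length_take, mB] at hzlt ⊢; omega
    have hsome : info[z]? = some info[z] := List.getElem?_eq_getElem hzl
    rw [List.drop_eq_getElem_cons hzt, PySem.List.enumerate_cons, List.getElem_take]
    rw [show ((z:Int) + 1) = (((z+1:Nat)):Int) from by push_cast; ring]
    rw [leavesB]
    have hsub : subsB info z = subsB info (z+1) ++ (subsB info (z+1)).map ((z:Int) :: ·) := by
      rw [subsB, if_neg (by omega)]
    rw [hsub, List.map_append, List.map_map]
    congr 1
    · rw [ih (z+1) (by omega)]
      apply List.map_congr_left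
      intro T hT
      rw [runB_skip hzlt (notMem_of_subsB_succ hT)]
    · rw [sliceZ, sliceZ']
      by_cases hlt : info[z] < rem
      · rw [if_pos hlt, ih (z+1) (by omega)]
        apply List.map_congr_left
        intro T hT
        rw [Function.comp_apply, runB_win hzlt hT]
        rw [show stepB info z true (rem, bal, sc)
              = (rem - (info[z] + 1),
                 (if info[z] ≠ 0 then bal + 2 * (10 - (z:Int)) else bal + (10 - (z:Int))),
                 sc.take z ++ [info[z] + 1] ++ sc.drop (z+1)) by
          rw [stepB, hsome]; simp [hlt]]
        simp
      · rw [if_neg hlt, ih (z+1) (by omega)]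
        apply List.map_congr_left
        intro T hT
        rw [Function.comp_apply, runB_win hzlt hT]
        rw [show stepB info z true (rem, bal, sc)
              = (rem - 1,
                 (if info[z] ≠ 0 then bal else bal - (10 - (z:Int))),
                 sc.take z ++ [1] ++ sc.drop (z+1)) by
          rw [stepB, hsome]; simp [hlt]]
        simp

-- balance shifts
theorem stepZ_bal_shift (info : List Int) (z : Nat) (w : Bool) (r b ε : Int) (s : List Int) :
    stepZ info z w (r, b + ε, s)
      = ((stepZ info z w (r, b, s)).1, (stepZ info z w (r, b, s)).2.1 + ε,
         (stepZ info z w (r, b, s)).2.2) := by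
  rcases h : info[z]? with _ | a
  · simp [stepZ, h]
  · cases w <;> simp only [stepZ, h] <;> split_ifs <;> simp <;> omega

theorem runFrom_bal_shift (info T : List Int) : ∀ (k z : Nat), 11 - z = k →
    ∀ (r b ε : Int) (s : List Int),
    runFrom info T z (r, b + ε, s)
      = ((runFrom info T z (r, b, s)).1, (runFrom info T z (r, b, s)).2.1 + ε,
         (runFrom info T z (r, b, s)).2.2) := by
  intro k
  induction k with
  | zero =>
    intro z hz r b ε s
    rw [runFrom_stop _ _ _ _ (by omega), runFrom_stop _ _ _ _ (by omega)]
  | succ k ih =>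
    intro z hz r b ε s
    conv_lhs => rw [runFrom]
    conv_rhs => rw [runFrom]
    simp only [if_neg (show ¬ 11 ≤ z by omega)]
    rw [stepZ_bal_shift]
    exact ih (z+1) (by omega) _ _ _ _

theorem stepB_eq_shift (info : List Int) (z : Nat) (w : Bool) (r b : Int) (s : List Int) :
    stepB info z w (r, b, s)
      = ((stepZ info z w (r, b, s)).1, (stepZ info z w (r, b, s)).2.1 + epsZ info z,
         (stepZ info z w (r, b, s)).2.2) := by
  rcases h : info[z]? with _ | a
  · simp [stepB, stepZ, epsZ, h]
  · cases w <;> simp only [stepB, stepZ, epsZ, h] <;> split_ifs <;> simp <;> omega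

theorem runB_eq_runFrom (info T : List Int) : ∀ (k z : Nat), mB info - z = k →
    ∀ (r b : Int) (s : List Int),
    runB info T z (r, b, s)
      = ((runFrom info T z (r, b, s)).1, (runFrom info T z (r, b, s)).2.1 + skipS info z,
         (runFrom info T z (r, b, s)).2.2) := by
  intro k
  induction k with
  | zero =>
    intro z hz r b s
    rw [runB_stop _ _ _ _ (by omega), skipS, if_pos (by omega)]
    have hF : runFrom info T z (r, b, s) = (r, b, s) := by
      by_cases h11 : 11 ≤ z
      · exact runFrom_stop _ _ _ _ h11
      · exact runFrom_ge_len (11 - z) z rfl info T _ (by simp [mB] at hz; omega)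
    rw [hF]
    simp
  | succ k ih =>
    intro z hz r b s
    have hzlt : z < mB info := by omega
    rw [runB, if_neg (by omega)]
    rw [show runFrom info T z (r, b, s)
          = runFrom info T (z+1) (stepZ info z (decide ((z:Int) ∈ T)) (r, b, s)) from by
      rw [runFrom, if_neg (by simp [mB] at hzlt; omega)]]
    rw [stepB_eq_shift]
    set X := stepZ info z (decide ((z:Int) ∈ T)) (r, b, s) with hX
    rw [ih (z+1) (by omega) X.1 (X.2.1 + epsZ info z) X.2.2]
    rw [runFrom_bal_shift info T (11 - (z+1)) (z+1) rfl X.1 X.2.1 (epsZ info z) X.2.2]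
    conv_rhs => rw [skipS]
    rw [if_neg (show ¬ mB info ≤ z by omega)]
    have hXt : (X.1, X.2.1, X.2.2) = X := rfl
    rw [hXt]
    refine Prod.ext rfl (Prod.ext ?_ rfl)
    simp only
    ring

theorem skipS_eq (info : List Int) : ∀ (k z : Nat), mB info - z = k →
    skipS info z
      = (((PySem.List.enumerate ((info.take 11).drop z) (z:Int)).filter
            (fun p => decide (p.2 ≠ 0))).map (fun p => 10 - p.1)).sum := by
  intro k
  induction k with
  | zero =>
    intro z hz
    have hdrop : (info.take 11).drop z = [] :=
      List.drop_eq_nil_of_le (by simp [List.length_take, mB] at hz ⊢; omega)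
    rw [hdrop, PySem.List.enumerate_nil, skipS, if_pos (by omega)]
    simp
  | succ k ih =>
    intro z hz
    have hzlt : z < mB info := by omega
    have hzl : z < info.length := by simp [mB] at hzlt; omega
    have hzt : z < (info.take 11).length := by simp [List.length_take, mB] at hzlt ⊢; omega
    rw [List.drop_eq_getElem_cons hzt, PySem.List.enumerate_cons, List.getElem_take]
    rw [show ((z:Int) + 1) = (((z+1:Nat)):Int) from by push_cast; ring]
    rw [skipS, if_neg (by omega), ih (z+1) (by omega)]
    rw [epsZ, List.getElem?_eq_getElem hzl]
    by_cases ha : info[z] ≠ 0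
    · rw [List.filter_cons, if_pos (by simpa using ha)]
      simp [ha]
    · rw [List.filter_cons, if_neg (by simpa using ha)]
      simp [ha]

theorem base_extra (info : List Int) : baseB info = extraA info - skipS info 0 := by
  have hsplit : PySem.List.enumerate info 0
      = PySem.List.enumerate (info.take 11) 0 ++
        PySem.List.enumerate (info.drop 11) (0 + (info.take 11).length) := by
    conv_lhs => rw [← List.take_append_drop 11 info]
    rw [PySem.List.enumerate_append]
  have hsufge : ∀ p ∈ PySem.List.enumerate (info.drop 11) (0 + (info.take 11).length),
      (11:Int) ≤ p.1 := by
    intro p hp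
    obtain ⟨kk, hk, rfl⟩ := (PySem.List.mem_enumerate_iff _ _ _).1 hp
    simp only [List.length_drop] at hk
    simp only [List.length_take]
    push_cast
    omega
  have hprefix_filter : (PySem.List.enumerate (info.take 11) 0).filter
      (fun p => decide (11 ≤ p.1) && decide (p.2 ≠ 0)) = [] := by
    rw [List.filter_eq_nil_iff]
    intro p hp
    obtain ⟨kk, hk, rfl⟩ := (PySem.List.mem_enumerate_iff _ _ _).1 hp
    simp only [List.length_take] at hk
    simp only [Bool.and_eq_true, decide_eq_true_eq, not_and]
    intro hc
    exfalso
    omega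
  have hfc : (PySem.List.enumerate (info.drop 11) (0 + (info.take 11).length)).filter
        (fun p => decide (p.2 ≠ 0))
      = (PySem.List.enumerate (info.drop 11) (0 + (info.take 11).length)).filter
        (fun p => decide (11 ≤ p.1) && decide (p.2 ≠ 0)) := by
    apply List.filter_congr
    intro p hp
    have := hsufge p hp
    simp [this]
  have hskip : skipS info 0
      = (((PySem.List.enumerate (info.take 11) 0).filter
            (fun p => decide (p.2 ≠ 0))).map (fun p => 10 - p.1)).sum := by
    have := skipS_eq info (mB info) 0 (by omega)
    simpa using this
  rw [baseB, extraA, hsplit, List.filter_append, List.filter_append, hprefix_filter,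
    List.nil_append, List.map_append, List.sum_append, hskip, hfc]
  ring

-- the leaf value of B's DFS for a real subset T equals A's per-subset value
theorem corrB (n : Int) (info : List Int) (T : List Int) :
    ((runB info T 0 (n, baseB info, List.replicate 11 0)).2.2.take 10 ++
       [(runB info T 0 (n, baseB info, List.replicate 11 0)).2.2.getD 10 0
         + (runB info T 0 (n, baseB info, List.replicate 11 0)).1],
     (runB info T 0 (n, baseB info, List.replicate 11 0)).2.1) = evC n info T := by
  have h1 := runB_eq_runFrom info T (mB info) 0 (by omega) n (baseB info) (List.replicate 11 0)
  have h2 : runFrom info T 0 (n, baseB info, List.replicate 11 0)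
      = ((runFrom info T 0 (n, 0, List.replicate 11 0)).1,
         (runFrom info T 0 (n, 0, List.replicate 11 0)).2.1 + baseB info,
         (runFrom info T 0 (n, 0, List.replicate 11 0)).2.2) := by
    have := runFrom_bal_shift info T 11 0 rfl n 0 (baseB info) (List.replicate 11 0)
    simpa using this
  rw [h1, h2, evC]
  simp only
  refine Prod.ext rfl ?_
  simp only
  rw [base_extra]
  ring

-- relating the two subset collections
theorem pyRangeSplit (info : List Int) :
    PySem.List.pyRange 0 11 = PySem.List.pyRange 0 (mB info : Int) ++
      PySem.List.pyRange (mB info : Int) 11 := by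
  exact PySem.List.pyRange_one_append 0 (mB info : Int) 11 (by positivity)
    (by have : mB info ≤ 11 := Nat.min_le_left _ _; exact_mod_cast this)

theorem subsB_to_LA (info : List Int) (T : List Int) (h : T ∈ subsB info 0) (hne : T ≠ []) :
    T ∈ LAsubs := by
  rw [LA_mem]
  refine ⟨?_, hne⟩
  have hs := (subsB_mem info (mB info) 0 (by omega) T).1 h
  rw [pyRangeSplit info]
  simp only [Nat.cast_zero] at hs
  exact hs.trans (List.sublist_append_left _ _)

theorem LA_to_subsB (info : List Int) (c : List Int) (hc : c ∈ LAsubs)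
    (hb : ∀ x ∈ c, x < (mB info : Int)) : c ∈ subsB info 0 := by
  obtain ⟨hsub, -⟩ := (LA_mem c).1 hc
  rw [pyRangeSplit info] at hsub
  obtain ⟨l1, l2, hc2, h1, h2⟩ := List.sublist_append_iff.1 hsub
  have hl2 : l2 = [] := by
    cases l2 with
    | nil => rfl
    | cons y t =>
      exfalso
      have hy : y ∈ PySem.List.pyRange (mB info : Int) 11 :=
        h2.subset (List.mem_cons_self ..)
      have hyc : y ∈ c := by rw [hc2]; exact List.mem_append_right _ (List.mem_cons_self ..)
      have := (PySem.List.mem_pyRange_one).1 hy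
      have := hb y hyc
      omega
  rw [subsB_mem info (mB info) 0 (by omega)]
  simp only [Nat.cast_zero]
  rw [hc2, hl2, List.append_nil]
  exact h1

-- phantom zones: dropping members ≥ mB does not change A's per-subset value
theorem evC_filter (n : Int) (info : List Int) (c : List Int)
    (hc : ∀ x ∈ c, (0:Int) ≤ x ∧ x < 11) :
    evC n info c = evC n info (c.filter (fun x => decide (x < (mB info : Int)))) := by
  have hr : runFrom info c 0 (n, 0, List.replicate 11 0)
      = runFrom info (c.filter (fun x => decide (x < (mB info : Int)))) 0
          (n, 0, List.replicate 11 0) := by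
    apply runFrom_congr 11 0 rfl
    intro j _ hjl
    constructor
    · intro hj
      refine List.mem_filter.2 ⟨hj, ?_⟩
      simp only [decide_eq_true_eq]
      have := hc _ hj
      simp [mB]
      constructor <;> [omega; exact_mod_cast hjl]
    · intro hj
      exact (List.mem_filter.1 hj).1
  rw [evC, evC, hr]

theorem runFrom_empty_bal (info : List Int) : ∀ (k z : Nat), 11 - z = k →
    ∀ (st : Int × Int × List Int), (runFrom info [] z st).2.1 ≤ st.2.1 := by
  intro k
  induction k with
  | zero => intro z hz st; rw [runFrom_stop _ _ _ _ (by omega)]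
  | succ k ih =>
    intro z hz st
    rw [runFrom, if_neg (by omega)]
    refine le_trans (ih (z+1) (by omega) _) ?_
    rw [show decide ((z:Int) ∈ ([] : List Int)) = false by simp]
    rw [stepZ]
    cases h : info[z]? with
    | none => exact le_refl _
    | some a =>
      by_cases ha : a ≠ 0 <;> simp [ha] <;> omega

theorem evC_nil_bal (n : Int) (info : List Int) (hlen : info.length < 11) :
    (evC n info []).2 ≤ 0 := by
  have hextra : extraA info = 0 := by
    rw [extraA]
    rw [show (PySem.List.enumerate info 0).filter
          (fun p => decide (11 ≤ p.1) && decide (p.2 ≠ 0)) = [] from by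
      rw [List.filter_eq_nil_iff]
      intro p hp
      obtain ⟨kk, hk, rfl⟩ := (PySem.List.mem_enumerate_iff _ _ _).1 hp
      simp only [Bool.and_eq_true, decide_eq_true_eq, not_and]
      intro habs
      exfalso
      omega]
    simp
  rw [evC]
  simp only
  rw [hextra, add_zero]
  have := runFrom_empty_bal info 11 0 rfl (n, 0, List.replicate 11 0)
  simpa using this

theorem sliceTake11 (info : List Int) :
    PySem.List.slice info none (some 11) = info.take 11 := by
  rw [show (11:Int) = ((11:Nat):Int) from by norm_num]
  exact PySem.List.slice_to_natCast ..

theorem main_eq (n : Int) (info : List Int) : solution n info = solution_alt n info := by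
  have hfold : (LAsubs.map (evalLeafA n info)).foldl considerA
        ((1 : Int), ([] : List (List Int)))
      = (PySem.List.pyRange 1 12).foldl
          (fun st i =>
            (PySem.List.combinations (PySem.List.pyRange 0 11) i.toNat).foldl
              (fun st cands => considerA st (evalLeafA n info cands)) st)
          (1, ([] : List (List Int))) := by
    rw [List.foldl_map, LAsubs, List.foldl_flatMap]
  rw [show solution n info
      = tailA (((PySem.List.pyRange 1 12).foldl
          (fun st i =>
            (PySem.List.combinations (PySem.List.pyRange 0 11) i.toNat).foldl
              (fun st cands => considerA st (evalLeafA n info cands)) st)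
          (1, ([] : List (List Int)))).2) from rfl]
  rw [← hfold]
  rw [show solution_alt n info
      = (match (leavesB (PySem.List.enumerate (PySem.List.slice info none (some 11)) 0) n
            (baseB info) (List.replicate 11 0) []).foldl bestStep none with
         | none => ([-1] : List Int)
         | some b => b.2) from rfl]
  rw [sliceTake11]
  rw [show PySem.List.enumerate (info.take 11) 0
        = PySem.List.enumerate ((info.take 11).drop 0) ((0:Nat):Int) from by simp]
  rw [leavesB_spec info (mB info) 0 (by omega)]
  rw [show (subsB info 0).map (fun T =>
        (([] : List Int) ++ T,
         (runB info T 0 (n, baseB info, List.replicate 11 0)).2.2.take 10 ++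
           [(runB info T 0 (n, baseB info, List.replicate 11 0)).2.2.getD 10 0
             + (runB info T 0 (n, baseB info, List.replicate 11 0)).1],
         (runB info T 0 (n, baseB info, List.replicate 11 0)).2.1))
      = (subsB info 0).map (fun T => (T, evC n info T)) from by
    apply List.map_congr_left
    intro T _
    have := corrB n info T
    rw [List.nil_append]
    exact congrArg (fun q : List Int × Int => ((T : List Int), q.1, q.2)) this]
  rw [considerA_inv (LAsubs.map (evalLeafA n info))]
  set P := LAsubs.map (evalLeafA n info) with hP
  set Bl := (subsB info 0).map (fun T => (T, evC n info T)) with hBl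
  by_cases hex : ∃ l ∈ P, 1 ≤ l.2
  · -- some candidate subset reaches balance ≥ 1
    obtain ⟨xl, M, hfind, htail, hsumxl, hbalxl, hmax⟩ := tailA_spec P hex
    rw [htail]
    rw [hP, List.find?_map] at hfind
    obtain ⟨c, hcf, hcx⟩ := Option.map_eq_some_iff.1 hfind
    have hcmem : c ∈ LAsubs := List.mem_of_find?_eq_some hcf
    have hevc : evC n info c = xl := by rw [← corr1 n info c hcmem]; exact hcx
    have hcbounds : ∀ x ∈ c, (0:Int) ≤ x ∧ x < 11 := by
      intro x hx
      obtain ⟨hsub, -⟩ := (LA_mem c).1 hcmem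
      exact (PySem.List.mem_pyRange_one).1 (hsub.subset hx)
    have hcne : c ≠ [] := ((LA_mem c).1 hcmem).2
    -- c, the FIRST subset attaining (MB, M), contains no phantom zone (index ≥ mB)
    have hreal : ∀ x ∈ c, x < (mB info : Int) := by
      by_contra hbad
      push_neg at hbad
      obtain ⟨x0, hx0c, hx0⟩ := hbad
      set c' := c.filter (fun x => decide (x < (mB info : Int))) with hc'
      have hlen11 : info.length < 11 := by
        have h1 := (hcbounds x0 hx0c).2
        by_contra hge
        push_neg at hge
        have : mB info = 11 := by simp [mB]; omega
        rw [this] at hx0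
        push_cast at hx0
        omega
      have hvals : evC n info c = evC n info c' := evC_filter n info c hcbounds
      have hc'ne : c' ≠ [] := by
        intro hnil
        have : evC n info c = evC n info [] := by rw [hvals, hnil]
        have hle := evC_nil_bal n info hlen11
        rw [← this, hevc, hbalxl] at hle
        have := MB_one P
        omega
      have hc'LA : c' ∈ LAsubs := by
        rw [LA_mem]
        refine ⟨(List.filter_sublist).trans ((LA_mem c).1 hcmem).1, hc'ne⟩
      have hc'len : c'.length < c.length := by
        refine lt_of_le_of_ne (List.filter_sublist).length_le ?_
        intro heq
        have hceq : c' = c := (List.filter_sublist).eq_of_length heq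
        have hx0' : x0 ∈ c' := hceq ▸ hx0c
        have := (List.mem_filter.1 hx0').2
        simp only [decide_eq_true_eq] at this
        omega
      have hpredc' : ((fun l => decide (l.2 = MB P) && (elemSumA l.1 == M)) ∘
          (evalLeafA n info)) c' = true := by
        have hpc := List.find?_some hcf
        simp only [Function.comp_apply] at hpc ⊢
        rw [corr1 n info c' hc'LA, ← hvals, ← corr1 n info c hcmem]
        exact hpc
      obtain ⟨hpc, pre, suf, hsplit2, hprenot⟩ := List.find?_eq_some_iff_append.1 hcf
      have hc'in : c' ∈ LAsubs := hc'LA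
      rw [hsplit2] at hc'in
      rcases List.mem_append.1 hc'in with hpre | hcons
      · have := hprenot _ hpre
        rw [hpredc'] at this
        cases this
      · rcases List.mem_cons.1 hcons with heq | hsuf
        · rw [heq] at hc'len; omega
        · have hpw := LA_pairwise
          rw [hsplit2] at hpw
          obtain ⟨-, hpw2, -⟩ := List.pairwise_append.1 hpw
          have hrel : rankLt c c' := (List.pairwise_cons.1 hpw2).1 c' hsuf
          rcases hrel with hlen | ⟨hlen, -⟩ <;> omega
    have hcs : c ∈ subsB info 0 := LA_to_subsB info c hcmem hreal
    have hok_c : okL (c, evC n info c) := by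
      simp only [okL, not_or, not_lt]
      refine ⟨hcne, ?_⟩
      show (1:Int) ≤ (evC n info c).2
      rw [hevc, hbalxl]
      exact MB_one P
    have hcBl : (c, evC n info c) ∈ Bl := by
      rw [hBl]; exact List.mem_map_of_mem hcs
    obtain ⟨r, hr⟩ : ∃ r, Bl.foldl bestStep none = some r := by
      rcases h : Bl.foldl bestStep none with _ | r
      · exact absurd hok_c ((bfold_none_iff Bl).1 h _ hcBl)
      · exact ⟨r, rfl⟩
    rw [hr]
    rcases bfold_mem Bl none r hr with h0 | ⟨leaf0, hleaf0Bl, hok0, hr0⟩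
    · cases h0
    have hleaf0Bl' : leaf0 ∈ (subsB info 0).map (fun T => (T, evC n info T)) := by
      rw [← hBl]; exact hleaf0Bl
    obtain ⟨T0, hT0s, hleaf0eq⟩ := List.mem_map.1 hleaf0Bl'
    subst hleaf0eq
    simp only [okL, not_or, not_lt] at hok0
    have hT0LA : T0 ∈ LAsubs := subsB_to_LA info T0 hT0s hok0.1
    have hT0P : evC n info T0 ∈ P := by
      rw [hP, ← corr1 n info T0 hT0LA]
      exact List.mem_map_of_mem hT0LA
    have hble : (evC n info T0).2 ≤ MB P := MB_ge P _ hT0P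
    have hk_c : keyLt (keyOfL (c, evC n info c)) r.1 = false :=
      (bfold_min Bl none r hr).2 _ hcBl hok_c
    have hr1 : r.1 = keyOfL (T0, evC n info T0) := by rw [hr0]
    rw [hr1] at hk_c
    simp only [keyOfL, keyLt] at hk_c
    have hbal0 : (evC n info T0).2 = MB P := by
      by_contra hne
      have h1 : -(evC n info c).2 < -(evC n info T0).2 := by
        have : (evC n info T0).2 < MB P := lt_of_le_of_ne hble hne
        rw [hevc, hbalxl]
        omega
      rw [listLtI_cons_lt _ _ h1] at hk_c
      cases hk_c
    have hsum0 : elemSumA (evC n info T0).1 = M := by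
      have hle2 : elemSumA (evC n info T0).1 ≤ M := hmax _ hT0P hbal0
      by_contra hne
      have h1 : -(elemSumB (evC n info c).1) < -(elemSumB (evC n info T0).1) := by
        rw [sumAB_eq, sumAB_eq, hevc, hsumxl]
        have : elemSumA (evC n info T0).1 < M := lt_of_le_of_ne hle2 hne
        omega
      have hhead : -(evC n info c).2 = -(evC n info T0).2 := by rw [hevc, hbalxl, hbal0]
      rw [hhead, listLtI_cons_eq] at hk_c
      rw [listLtI_cons_lt _ _ h1] at hk_c
      cases hk_c
    have hpred0 : ((fun l => decide (l.2 = MB P) && (elemSumA l.1 == M)) ∘ (evalLeafA n info)) T0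
        = true := by
      simp only [Function.comp_apply]
      rw [corr1 n info T0 hT0LA]
      simp [hbal0, hsum0]
    obtain ⟨hpc, pre, suf, hsplit2, hprenot⟩ := List.find?_eq_some_iff_append.1 hcf
    have hT0eqc : T0 = c := by
      have hT0in : T0 ∈ LAsubs := hT0LA
      rw [hsplit2] at hT0in
      rcases List.mem_append.1 hT0in with hpre | hcons
      · have hcontra := hprenot _ hpre
        rw [hpred0] at hcontra
        cases hcontra
      · rcases List.mem_cons.1 hcons with heq | hsuf
        · exact heq
        · exfalso
          have hpw := LA_pairwise
          rw [hsplit2] at hpw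
          obtain ⟨-, hpw2, -⟩ := List.pairwise_append.1 hpw
          have hrel : rankLt c T0 := (List.pairwise_cons.1 hpw2).1 T0 hsuf
          have hhead1 : -(evC n info c).2 = -(evC n info T0).2 := by rw [hevc, hbalxl, hbal0]
          have hhead2 : -(elemSumB (evC n info c).1) = -(elemSumB (evC n info T0).1) := by
            rw [sumAB_eq, sumAB_eq, hevc, hsumxl, hsum0]
          rw [hhead1, hhead2, listLtI_cons_eq, listLtI_cons_eq] at hk_c
          rcases hrel with hlen | ⟨hlen, hlt⟩
          · have hcast : ((c.length:Int) < (T0.length:Int)) := by exact_mod_cast hlen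
            rw [listLtI_cons_lt _ _ hcast] at hk_c
            cases hk_c
          · have hcast : ((c.length:Int)) = ((T0.length:Int)) := by exact_mod_cast hlen
            rw [hcast, listLtI_cons_eq, hlt] at hk_c
            cases hk_c
    show xl.1 = r.2
    rw [hr0]
    show xl.1 = (evC n info T0).1
    rw [hT0eqc, hevc]
  · -- no candidate subset reaches balance ≥ 1: both return [-1]
    have hded : dedupGo [] ((P.filter (fun l => decide (l.2 = MB P))).map (·.1)) = [] := by
      rw [List.eq_nil_iff_forall_not_mem]
      intro v hv
      rcases (dedupGo_mem _ [] v).1 hv with h | h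
      · cases h
      · obtain ⟨l, hl, rfl⟩ := List.mem_map.1 h
        have hlf := List.mem_filter.1 hl
        refine hex ⟨l, hlf.1, ?_⟩
        have h1 := MB_one P
        have h2 : l.2 = MB P := by simpa using hlf.2
        omega
    rw [hded]
    have hnone : Bl.foldl bestStep none = none := by
      rw [bfold_none_iff]
      intro leaf hleaf hok
      have hleaf' : leaf ∈ (subsB info 0).map (fun T => (T, evC n info T)) := by
        rw [← hBl]; exact hleaf
      obtain ⟨T, hTs, rfl⟩ := List.mem_map.1 hleaf'
      simp only [okL, not_or, not_lt] at hok
      have hTLA : T ∈ LAsubs := subsB_to_LA info T hTs hok.1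
      refine hex ⟨evalLeafA n info T, ?_, ?_⟩
      · rw [hP]; exact List.mem_map_of_mem hTLA
      · rw [corr1 n info T hTLA]
        exact hok.2
    rw [hnone]
    simp [tailA]

-- ===== VERDICT (by name: the statement is the Claim_ definition above) =====
theorem solution_spec : Claim_equal_solution := by
  intro n info _
  unfold Spec_solution
  exact main_eq n info
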